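-- pv_equiv track=rewrite | github.com/mogam-ai/DuET | scripts/generate_sequence_feature.py | get_number_uAUGs
-- ===== SOURCE A (Python) =====
-- from typing import Callable, Final, Optional
--
-- START_CODONS: Final[set[str]] = {f"A{u}G" for u in "TUMP1"} # pU, m1pU
--
-- def get_number_uAUGs(seq: str, is_seq_frame_aligned: bool=True) -> tuple[int, int, int]:
--     """Returns number of in-frame, out-frame, total uAUGs from the input sequence.
--     Set is_seq_frame_aligned=True for CDS and 3' UTR; False for 5' UTR and full sequence."""
--
--     frame_basis = 0 if is_seq_frame_aligned else len(seq) % 3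
--     inframe, outframe = 0, 0
--
--     s = seq.upper()
--
--     for i in range(len(s)-2):
--         if s[i:i+3] in START_CODONS:
--             if (len(s) - i) % 3 == frame_basis:
--                 inframe += 1
--             else:
--                 outframe += 1
--
--     return inframe, outframe, inframe + outframe
-- ===== SOURCE B (Python) =====
-- def get_number_uAUGs(seq, is_seq_frame_aligned=True):
--     """Returns number of in-frame, out-frame, total uAUGs from the input sequence."""
--     s = seq.upper()
--     target = len(s) % 3 if is_seq_frame_aligned else 0
--     a_pos = {i for i, ch in enumerate(s) if ch == 'A'}
--     mid_pos = {i - 1 for i, ch in enumerate(s) if ch in 'TUMP1'}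
--     g_pos = {i - 2 for i, ch in enumerate(s) if ch == 'G'}
--     hits = a_pos & mid_pos & g_pos
--     inframe = sum(1 for i in hits if i % 3 == target)
--     total = len(hits)
--     return inframe, total - inframe, total
-- ===== Notes on version B (the rewrite author's own statement) =====
-- stated objective: alternative
-- what changed: A scans every index once and tests each 3-character slice against the start-codon set with two in-loop counters; B instead makes three independent passes building the index sets of 'A' characters, middle characters shifted by 1 and 'G' characters shifted by 2, intersects the three sets to obtain the codon start positions, and counts in-frame positions over that set, deriving out-frame as total - inframe.
import Mathlib
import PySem

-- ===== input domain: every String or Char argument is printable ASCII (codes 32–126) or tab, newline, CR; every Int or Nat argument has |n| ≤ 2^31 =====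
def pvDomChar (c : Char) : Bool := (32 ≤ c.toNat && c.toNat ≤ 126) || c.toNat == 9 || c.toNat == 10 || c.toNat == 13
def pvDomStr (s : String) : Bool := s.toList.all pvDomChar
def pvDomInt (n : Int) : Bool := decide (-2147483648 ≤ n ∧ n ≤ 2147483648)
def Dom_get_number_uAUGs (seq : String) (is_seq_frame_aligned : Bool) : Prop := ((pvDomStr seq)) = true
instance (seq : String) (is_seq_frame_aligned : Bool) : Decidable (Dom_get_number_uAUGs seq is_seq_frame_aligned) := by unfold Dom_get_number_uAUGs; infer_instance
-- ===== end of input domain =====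

-- B replaces A's single window scan over every index by three independent passes that build the
-- index sets of 'A' chars, (shifted) middle chars and (shifted) 'G' chars, intersects them to get
-- the codon start positions, and counts frames over that set (objective: alternative; same cost).


-- ===== PORT A =====
-- START_CODONS = {f"A{u}G" for u in "TUMP1"} (strings modelled as List Char)
def START_CODONS : PySem.Set (List Char) :=
  PySem.Set.ofList (("TUMP1".toList).map (fun u => ['A', u, 'G']))

def get_number_uAUGs (seq : String) (is_seq_frame_aligned : Bool) : Int × Int × Int :=
  let frame_basis : Int :=
    if is_seq_frame_aligned then 0 else PySem.Int.mod (PySem.Str.len seq) 3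
  let s : List Char := (PySem.Str.upper seq).toList
  let n : Int := PySem.List.len s
  let st :=
    (PySem.List.pyRange 0 (n - 2) 1).foldl
      (fun (acc : Int × Int) i =>
        if PySem.Set.contains START_CODONS (PySem.List.slice s (some i) (some (i + 3))) then
          if PySem.Int.mod (n - i) 3 = frame_basis then (acc.1 + 1, acc.2)
          else (acc.1, acc.2 + 1)
        else acc)
      (0, 0)
  (st.1, st.2, st.1 + st.2)

-- ===== PORT B =====
def get_number_uAUGs_alt (seq : String) (is_seq_frame_aligned : Bool) : Int × Int × Int :=
  let s : List Char := (PySem.Str.upper seq).toList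
  let target : Int :=
    if is_seq_frame_aligned then PySem.Int.mod (PySem.List.len s) 3 else 0
  let a_pos : PySem.Set Int :=
    PySem.Set.ofList (((PySem.List.enumerate s 0).filter (fun p => p.2 == 'A')).map (·.1))
  let mid_pos : PySem.Set Int :=
    PySem.Set.ofList (((PySem.List.enumerate s 0).filter
      (fun p => PySem.Chars.isIn [p.2] ("TUMP1".toList))).map (fun p => p.1 - 1))
  let g_pos : PySem.Set Int :=
    PySem.Set.ofList (((PySem.List.enumerate s 0).filter (fun p => p.2 == 'G')).map (fun p => p.1 - 2))
  let hits : PySem.Set Int := PySem.Set.inter (PySem.Set.inter a_pos mid_pos) g_pos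
  -- 'sum(1 for i in hits if …)' and 'len(hits)' consume the set only order-insensitively
  let inframe : Int := (hits.countP (fun i => PySem.Int.mod i 3 == target) : Int)
  let total : Int := PySem.Set.len hits
  (inframe, total - inframe, total)

-- ===== PRECONDITION & SPEC =====
def Spec_get_number_uAUGs (seq : String) (is_seq_frame_aligned : Bool) (out : Int × Int × Int) : Prop := out = get_number_uAUGs_alt seq is_seq_frame_aligned
instance (seq : String) (is_seq_frame_aligned : Bool) (out : Int × Int × Int) : Decidable (Spec_get_number_uAUGs seq is_seq_frame_aligned out) := by unfold Spec_get_number_uAUGs; infer_instance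

-- ===== CLAIM (what is proved, stated in full; the proofs are below) =====
def Claim_equal_get_number_uAUGs : Prop := ∀ (seq : String) (is_seq_frame_aligned : Bool), Dom_get_number_uAUGs seq is_seq_frame_aligned → Spec_get_number_uAUGs seq is_seq_frame_aligned (get_number_uAUGs seq is_seq_frame_aligned)

-- ===== LEMMAS AND PROOFS =====
set_option maxHeartbeats 1000000

-- the window test at Nat index k, as a predicate on the index
def pvHit (cs : List Char) (k : Nat) : Bool :=
  cs.getD k ' ' == 'A' && cs.getD (k + 2) ' ' == 'G' &&
    PySem.Chars.isIn [cs.getD (k + 1) ' '] ("TUMP1".toList)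

-- the frame test for the window starting at Nat index k
def pvFrame (n k : Nat) (al : Bool) : Bool :=
  PySem.Int.mod (k : Int) 3 == (if al then PySem.Int.mod (n : Int) 3 else 0)

-- the reference list of hit positions, nodup and strictly describing both programs' counts
def pvHits (cs : List Char) : List Int :=
  ((List.range (cs.length - 2)).filter (pvHit cs)).map (fun k : Nat => ((k : Nat) : Int))

theorem pvIsIn_singleton (c : Char) (l : List Char) :
    PySem.Chars.isIn [c] l = true ↔ c ∈ l := by
  rw [PySem.Chars.isIn_iff_infix]
  constructor
  · intro h; exact h.subset (List.mem_singleton_self c)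
  · intro h
    obtain ⟨s, t, rfl⟩ := List.append_of_mem h
    exact ⟨s, t, by simp⟩

-- A's slice-in-set test agrees with the characterwise test, inside the range
theorem pvSlice_mem_iff (cs : List Char) (k : Nat) (hk : k + 2 < cs.length) :
    PySem.Set.contains START_CODONS
        (PySem.List.slice cs (some (k : Int)) (some ((k : Int) + 3))) = pvHit cs k := by
  have h3 : ((k : Int) + 3) = ((k : Int) + ((3 : Nat) : Int)) := by push_cast; ring
  rw [h3, PySem.List.slice_natCast_add]
  have hdrop : cs.drop k = cs[k] :: cs[k+1] :: cs[k+2] :: cs.drop (k + 3) := by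
    rw [List.drop_eq_getElem_cons (by omega)]
    congr 1
    rw [List.drop_eq_getElem_cons (by omega)]
    congr 1
    rw [List.drop_eq_getElem_cons (by omega)]
  rw [hdrop]
  have e0 : cs.getD k ' ' = cs[k] := List.getD_eq_getElem _ _ (by omega)
  have e1 : cs.getD (k+1) ' ' = cs[k+1] := List.getD_eq_getElem _ _ (by omega)
  have e2 : cs.getD (k+2) ' ' = cs[k+2] := List.getD_eq_getElem _ _ (by omega)
  have hsc : START_CODONS = [['A','T','G'],['A','U','G'],['A','M','G'],['A','P','G'],['A','1','G']] := by decide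
  have hT : "TUMP1".toList = ['T','U','M','P','1'] := by decide
  rw [Bool.eq_iff_iff]
  simp only [List.take_succ_cons, List.take_zero, pvHit, e0, e1, e2, hsc, hT,
    PySem.Set.contains, List.contains_iff_mem, pvIsIn_singleton,
    Bool.and_eq_true, beq_iff_eq, List.mem_cons, List.not_mem_nil, or_false,
    List.cons.injEq, and_true]
  constructor
  · rintro (h | h | h | h | h) <;> simp_all
  · rintro ⟨⟨hA, hG⟩, (h | h | h | h | h)⟩ <;> simp_all

-- frame arithmetic: (n - k) % 3 == frame_basis  ↔  k % 3 == target
theorem pvFrame_iff (n k : Nat) (al : Bool) :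
    (PySem.Int.mod ((n : Int) - (k : Int)) 3 =
        (if al then 0 else PySem.Int.mod (n : Int) 3)) ↔ pvFrame n k al = true := by
  unfold pvFrame
  rw [beq_iff_eq,
      PySem.Int.mod_eq_emod_of_pos (by norm_num),
      PySem.Int.mod_eq_emod_of_pos (by norm_num)]
  cases al <;> simp <;> omega

-- A's loop computes the two counts of its branch predicates
theorem pvLoopA {α : Type} (C : α → Bool) (D : α → Prop) [inst : DecidablePred D] :
    ∀ (l : List α) (acc : Int × Int),
      (l.foldl (fun (acc : Int × Int) i =>
          if C i then if D i then (acc.1 + 1, acc.2) else (acc.1, acc.2 + 1) else acc) acc)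
        = (acc.1 + (l.countP fun i => C i && decide (D i)),
           acc.2 + (l.countP fun i => C i && !decide (D i))) := by
  intro l
  induction l with
  | nil => intro acc; simp
  | cons x xs ih =>
    intro acc
    by_cases hc : C x = true
    · by_cases hd : D x <;>
        simp [hc, hd, ih, Prod.ext_iff] <;> omega
    · simp [hc, ih]

theorem pvCountP_split {α : Type} (l : List α) (h f : α → Bool) :
    l.countP (fun i => h i && f i) + l.countP (fun i => h i && !f i) = l.countP h := by
  induction l with
  | nil => simp
  | cons x xs ih =>
    by_cases hx : h x = true <;> by_cases fx : f x = true <;>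
      simp [hx, fx, ← ih] <;> omega

-- A's hit-count over the index range, in-frame windows
theorem pvA_count1 (cs : List Char) (al : Bool) :
    ((List.range (cs.length - 2)).map (fun k : Nat => ((k : Nat) : Int))).countP
      (fun i => PySem.Set.contains START_CODONS (PySem.List.slice cs (some i) (some (i + 3)))
        && decide (PySem.Int.mod ((cs.length : Int) - i) 3 =
             (if al = true then 0 else PySem.Int.mod (cs.length : Int) 3)))
    = (List.range (cs.length - 2)).countP (fun k => pvHit cs k && pvFrame cs.length k al) := by
  rw [List.countP_map]
  apply List.countP_congr
  intro k hk
  have hk2 : k + 2 < cs.length := by have := List.mem_range.mp hk; omega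
  simp only [Function.comp_apply, pvSlice_mem_iff cs k hk2]
  by_cases hf : pvFrame cs.length k al = true
  · have hp := (pvFrame_iff cs.length k al).mpr hf
    simp only [PySem.Int.mod_eq_emod_of_pos (show (0:Int) < 3 by norm_num)] at hp
    simp [hf, hp]
  · have hf' : pvFrame cs.length k al = false := by simpa using hf
    have hnp : ¬ (PySem.Int.mod ((cs.length : Int) - (k : Int)) 3 =
        (if al = true then 0 else PySem.Int.mod (cs.length : Int) 3)) :=
      fun hc => absurd ((pvFrame_iff cs.length k al).mp hc) (by simp [hf'])
    simp only [PySem.Int.mod_eq_emod_of_pos (show (0:Int) < 3 by norm_num)] at hnp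
    simp [hf', hnp]

-- A's hit-count over the index range, out-of-frame windows
theorem pvA_count2 (cs : List Char) (al : Bool) :
    ((List.range (cs.length - 2)).map (fun k : Nat => ((k : Nat) : Int))).countP
      (fun i => PySem.Set.contains START_CODONS (PySem.List.slice cs (some i) (some (i + 3)))
        && !decide (PySem.Int.mod ((cs.length : Int) - i) 3 =
             (if al = true then 0 else PySem.Int.mod (cs.length : Int) 3)))
    = (List.range (cs.length - 2)).countP (fun k => pvHit cs k && !pvFrame cs.length k al) := by
  rw [List.countP_map]
  apply List.countP_congr
  intro k hk
  have hk2 : k + 2 < cs.length := by have := List.mem_range.mp hk; omega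
  simp only [Function.comp_apply, pvSlice_mem_iff cs k hk2]
  by_cases hf : pvFrame cs.length k al = true
  · have hp := (pvFrame_iff cs.length k al).mpr hf
    simp only [PySem.Int.mod_eq_emod_of_pos (show (0:Int) < 3 by norm_num)] at hp
    simp [hf, hp]
  · have hf' : pvFrame cs.length k al = false := by simpa using hf
    have hnp : ¬ (PySem.Int.mod ((cs.length : Int) - (k : Int)) 3 =
        (if al = true then 0 else PySem.Int.mod (cs.length : Int) 3)) :=
      fun hc => absurd ((pvFrame_iff cs.length k al).mp hc) (by simp [hf'])
    simp only [PySem.Int.mod_eq_emod_of_pos (show (0:Int) < 3 by norm_num)] at hnp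
    simp [hf', hnp]

-- membership in B's intersected set is exactly the window test
theorem pvMem_hits (cs : List Char) (i : Int) :
    i ∈ PySem.Set.inter (PySem.Set.inter
          (PySem.Set.ofList (((PySem.List.enumerate cs 0).filter (fun p => p.2 == 'A')).map (·.1)))
          (PySem.Set.ofList (((PySem.List.enumerate cs 0).filter
              (fun p => PySem.Chars.isIn [p.2] ("TUMP1".toList))).map (fun p => p.1 - 1))))
        (PySem.Set.ofList (((PySem.List.enumerate cs 0).filter (fun p => p.2 == 'G')).map (fun p => p.1 - 2)))
      ↔ ∃ (k : Nat), ∃ (h : k + 2 < cs.length), i = (k : Int) ∧ pvHit cs k = true := by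
  rw [PySem.Set.mem_inter, PySem.Set.mem_inter,
    PySem.Set.mem_ofList, PySem.Set.mem_ofList, PySem.Set.mem_ofList]
  simp only [List.mem_map, List.mem_filter, PySem.List.mem_enumerate_iff, zero_add]
  constructor
  · rintro ⟨⟨ha, hm⟩, hg⟩
    obtain ⟨pa, ⟨⟨ka, hka, rfl⟩, hA⟩, hia⟩ := ha
    obtain ⟨pm, ⟨⟨km, hkm, rfl⟩, hM⟩, him⟩ := hm
    obtain ⟨pg, ⟨⟨kg, hkg, rfl⟩, hG⟩, hig⟩ := hg
    simp only at hia him hig hA hM hG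
    have hkm' : km = ka + 1 := by omega
    have hkg' : kg = ka + 2 := by omega
    subst hkm' hkg'
    refine ⟨ka, by omega, by omega, ?_⟩
    unfold pvHit
    rw [List.getD_eq_getElem _ _ (by omega), List.getD_eq_getElem _ _ (by omega),
        List.getD_eq_getElem _ _ (by omega)]
    simp only [Bool.and_eq_true]
    exact ⟨⟨hA, hG⟩, hM⟩
  · rintro ⟨k, hk, rfl, hh⟩
    unfold pvHit at hh
    rw [List.getD_eq_getElem _ _ (by omega), List.getD_eq_getElem _ _ (by omega),
        List.getD_eq_getElem _ _ (by omega)] at hh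
    simp only [Bool.and_eq_true] at hh
    refine ⟨⟨⟨((k : Int), cs[k]), ⟨⟨k, by omega, rfl⟩, hh.1.1⟩, rfl⟩,
            ⟨(((k : Int) + 1), cs[k+1]), ⟨⟨k + 1, by omega, by push_cast; ring_nf⟩, hh.2⟩, by ring⟩⟩,
            ⟨(((k : Int) + 2), cs[k+2]), ⟨⟨k + 2, by omega, by push_cast; ring_nf⟩, hh.1.2⟩, by ring⟩⟩

theorem pvHits_nodup (cs : List Char) : (pvHits cs).Nodup := by
  apply List.Nodup.map
  · intro a b h; exact Int.natCast_inj.mp h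
  · exact (List.nodup_range).filter _

theorem pvMem_pvHits (cs : List Char) (i : Int) :
    i ∈ pvHits cs ↔ ∃ (k : Nat), ∃ (h : k + 2 < cs.length), i = (k : Int) ∧ pvHit cs k = true := by
  unfold pvHits
  simp only [List.mem_map, List.mem_filter, List.mem_range]
  constructor
  · rintro ⟨k, ⟨hk, hh⟩, rfl⟩; exact ⟨k, by omega, rfl, hh⟩
  · rintro ⟨k, hk, rfl, hh⟩; exact ⟨k, ⟨by omega, hh⟩, rfl⟩

theorem get_number_uAUGs_eq (seq : String) (al : Bool) :
    get_number_uAUGs seq al = get_number_uAUGs_alt seq al := by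
  unfold get_number_uAUGs get_number_uAUGs_alt
  set cs : List Char := (PySem.Str.upper seq).toList with hcs
  simp only [PySem.Str.len_eq, PySem.List.len_eq]
  rw [show ((seq.toList.length : Nat) : Int) = ((cs.length : Nat) : Int) by
    rw [String.length_toList, hcs, PySem.Str.toList_upper]; simp [PySem.Chars.upper]]
  -- B's hits set is a permutation of the reference pvHits list
  have hperm : (PySem.Set.inter (PySem.Set.inter
          (PySem.Set.ofList (((PySem.List.enumerate cs 0).filter (fun p => p.2 == 'A')).map (·.1)))
          (PySem.Set.ofList (((PySem.List.enumerate cs 0).filter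
              (fun p => PySem.Chars.isIn [p.2] ("TUMP1".toList))).map (fun p => p.1 - 1))))
        (PySem.Set.ofList (((PySem.List.enumerate cs 0).filter (fun p => p.2 == 'G')).map (fun p => p.1 - 2)))).Perm
      (pvHits cs) := by
    apply (List.perm_ext_iff_of_nodup ?_ (pvHits_nodup cs)).mpr
    · intro i
      rw [pvMem_hits cs i, pvMem_pvHits cs i]
    · exact PySem.Set.nodup_inter _ _ (PySem.Set.nodup_inter _ _ (PySem.Set.nodup_ofList _))
  rw [show PySem.List.pyRange 0 ((cs.length : Int) - 2) 1 =
      (List.range (cs.length - 2)).map (fun k : Nat => ((k : Nat) : Int)) by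
    by_cases h2 : 2 ≤ cs.length
    · rw [show ((cs.length : Int) - 2) = (((cs.length - 2 : Nat)) : Int) by push_cast [h2]; omega,
        PySem.List.pyRange_zero_natCast]
    · rw [show (cs.length - 2 : Nat) = 0 by omega,
        PySem.List.pyRange_one_eq_nil (show (cs.length : Int) - 2 ≤ 0 by omega)]
      simp]
  rw [pvLoopA
    (fun i : Int => PySem.Set.contains START_CODONS (PySem.List.slice cs (some i) (some (i + 3))))
    (fun i : Int => PySem.Int.mod ((cs.length : Int) - i) 3 =
      (if al = true then 0 else PySem.Int.mod (cs.length : Int) 3))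
    ((List.range (cs.length - 2)).map (fun k : Nat => ((k : Nat) : Int))) (0, 0)]
  rw [pvA_count1 cs al, pvA_count2 cs al]
  rw [hperm.countP_eq]
  simp only [PySem.Set.len, hperm.length_eq]
  -- B's counts over pvHits equal the range counts
  have hbin : (pvHits cs).countP (fun i => PySem.Int.mod i 3 ==
        (if al = true then PySem.Int.mod ((cs.length : Nat) : Int) 3 else 0))
      = (List.range (cs.length - 2)).countP (fun k => pvHit cs k && pvFrame cs.length k al) := by
    unfold pvHits
    rw [List.countP_map, List.countP_filter]
    apply List.countP_congr
    intro k _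
    simp only [Function.comp_apply, pvFrame, Bool.and_comm]
  have hbtot : ((pvHits cs).length : Int)
      = ((List.range (cs.length - 2)).countP (fun k => pvHit cs k) : Int) := by
    unfold pvHits
    rw [List.length_map, ← List.countP_eq_length_filter]
  rw [hbin]
  have hsplit : (List.range (cs.length - 2)).countP (fun k => pvHit cs k && pvFrame cs.length k al)
      + (List.range (cs.length - 2)).countP (fun k => pvHit cs k && !pvFrame cs.length k al)
      = (List.range (cs.length - 2)).countP (fun k => pvHit cs k) :=
    pvCountP_split _ _ _
  simp only [Prod.mk.injEq]
  refine ⟨by omega, by omega, by omega⟩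

-- ===== VERDICT (by name: the statement is the Claim_ definition above) =====
theorem get_number_uAUGs_spec : Claim_equal_get_number_uAUGs := by
  intro seq al _
  unfold Spec_get_number_uAUGs
  exact get_number_uAUGs_eq seq al
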